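-- pv_equiv track=rewrite | github.com/mcocozza/Tarea1CocozzaDevandas | Tarea1CocozzaDevandas.py | verify_array_op
-- ===== SOURCE A (Python) =====
-- import math
--
-- def multiple_op(n):
--
--     # Este método toma el parametro de entrada y determina
--     # si el numero es positivo y entero
--     # En caso de no cumplirse, devuelve un codigo de error
--     # 22.
--     # Si es positivo y entero, rellena un array con las
--     # siguientes operaciones en orden: X*X, 2^X, X!.
--
--     b = []
--     if type(n) == int and n >= 0:  # chequeo de parametros
--
--         X = n  # operaciones para el array
--         b.append(X*X)
--         b.append(2**X)
--         b.append(math.factorial(X))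
--
--         return b
--     else:
--         return 22  # codigo de error argumento invalido
--
-- def verify_array_op(n):
--     # Este método toma el parametro de entrada y determina
--     # si el array de entrada son solamente numeros enteros
--     # positivos.
--     # En caso de no cumplirse, devuelve un codigo de error
--     # 22.
--     # Para miembro del array se utiliza el metodo:multiple_op
--
--     a = []
--     for i in n:
--         if type(i) == int and i >= 0:  # chequeo de parametros
--
--             a.append(multiple_op(i))
--
--         else:
--             return 22  # codigo de error argumento invalido
--
--     return a
-- ===== SOURCE B (Python) =====
-- import math
--
-- def verify_array_op(n):
--     # Two-pass decomposition: validate everything first, then map.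
--     if all(type(i) == int and i >= 0 for i in n):
--         return [[i * i, 2 ** i, math.factorial(i)] for i in n]
--     return 22  # codigo de error argumento invalido
-- ===== Notes on version B (the rewrite author's own statement) =====
-- stated objective: simpler
-- what changed: Replaces A's single interleaved loop (per-element check, helper call, append, early return) by a two-pass decomposition: one all() validity predicate, then one list comprehension mapping each i to [i*i, 2**i, i!].
-- outside the precondition, e.g. on verify_array_op([-1]): A returns 22, B returns 22
import Mathlib
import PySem

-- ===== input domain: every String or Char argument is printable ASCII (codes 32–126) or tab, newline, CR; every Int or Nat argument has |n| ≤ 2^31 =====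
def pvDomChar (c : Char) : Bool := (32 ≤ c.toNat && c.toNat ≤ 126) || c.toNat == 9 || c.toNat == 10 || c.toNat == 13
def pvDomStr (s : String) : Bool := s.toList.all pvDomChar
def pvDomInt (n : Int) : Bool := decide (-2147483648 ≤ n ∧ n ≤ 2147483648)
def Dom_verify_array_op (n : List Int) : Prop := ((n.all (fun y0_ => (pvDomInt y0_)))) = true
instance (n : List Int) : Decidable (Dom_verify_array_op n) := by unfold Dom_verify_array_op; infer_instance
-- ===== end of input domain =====

-- B replaces A's single interleaved loop-with-early-return by a two-pass
-- decomposition (validate all, then map via comprehension); objective: simpler.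


-- ===== PORT A =====
-- multiple_op: its negative branch (Python returns the int 22) is unreachable under Pre_.
def multiple_op (i : Int) : List Int :=
  if 0 ≤ i then [i * i, 2 ^ i.toNat, (Nat.factorial i.toNat : Int)] else []

-- A's loop: per-element check, append multiple_op, early return 22 (modelled as none).
def verifyLoopA : List Int → List (List Int) → Option (List (List Int))
  | [], a => some a
  | i :: rest, a => if 0 ≤ i then verifyLoopA rest (a ++ [multiple_op i]) else none

def verify_array_op (n : List Int) : List (List Int) :=
  (verifyLoopA n []).getD []

-- ===== PORT B =====
def verify_array_op_alt (n : List Int) : List (List Int) :=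
  if n.all (fun i => 0 ≤ i) then
    n.map (fun i => [i * i, 2 ^ i.toNat, (Nat.factorial i.toNat : Int)])
  else []

-- ===== PRECONDITION & SPEC =====
-- Pre_ excludes lists containing a negative element: there Python A (and B) return
-- the bare int 22, an error code outside the declared List (List Int) return type.
def Pre_verify_array_op (n : List Int) : Prop := ∀ i ∈ n, 0 ≤ i
instance (n : List Int) : Decidable (Pre_verify_array_op n) := by unfold Pre_verify_array_op; infer_instance
def pvWitness_verify_array_op : List Int := [0, 1, 3]

def Spec_verify_array_op (n : List Int) (out : List (List Int)) : Prop := out = verify_array_op_alt n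
instance (n : List Int) (out : List (List Int)) : Decidable (Spec_verify_array_op n out) := by unfold Spec_verify_array_op; infer_instance

-- ===== CLAIM (what is proved, stated in full; the proofs are below) =====
def Claim_equal_verify_array_op : Prop := ∀ (n : List Int), Dom_verify_array_op n → Pre_verify_array_op n → Spec_verify_array_op n (verify_array_op n)

-- ===== LEMMAS AND PROOFS =====
theorem verifyLoopA_all_nonneg (l : List Int) (a : List (List Int))
    (h : ∀ i ∈ l, 0 ≤ i) :
    verifyLoopA l a = some (a ++ l.map multiple_op) := by
  induction l generalizing a with
  | nil => simp [verifyLoopA]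
  | cons x xs ih =>
    have hx : 0 ≤ x := h x (List.mem_cons_self ..)
    simp [verifyLoopA, hx, ih _ (fun i hi => h i (List.mem_cons_of_mem _ hi))]

-- ===== VERDICT (by name: the statement is the Claim_ definition above) =====
theorem verify_array_op_spec : Claim_equal_verify_array_op := by
  intro n _ hpre
  unfold Spec_verify_array_op verify_array_op verify_array_op_alt
  rw [verifyLoopA_all_nonneg n [] hpre]
  have hall : n.all (fun i => 0 ≤ i) = true := by
    simp only [List.all_eq_true, decide_eq_true_eq]; exact hpre
  simp only [hall, Option.getD_some, List.nil_append]
  exact List.map_congr_left fun i hi => by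
    simp [multiple_op, hpre i hi]
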